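-- pv_equiv track=rewrite | github.com/vellinau/Braess-paradox | simulation_pkg/plot_tools/util.py | make_counts
-- ===== SOURCE A (Python) =====
-- def make_counts(data, cost, minutes):
--     '''
--     Determine how many cars were at different roads after each full minute.
--     '''
--     names = ["AB", "AC", "AC - bus", "Buspas", "Łącznik", "BD", "CD", "CD - bus"]
--     counts = {}
--     for name in names:
--         counts[name] = [0] * minutes
--         for minute in range(minutes):
--             if name in ["AB", "AC"] and minute <= cost[name]:
--                 counts[name][minute] = data["decision_count"][name][0]
--             elif name in ["AC - bus", "Buspas"] and minute <= cost[name]: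
--                 counts[name][minute] = data["bus_count"][name][0]
--             elif name == "Łącznik" and cost["AB"] <= minute <= cost["AB"] + cost[name]:
--                 counts[name][minute] = data["decision_count"][name][0]
--             elif name == "BD" and minutes - cost[name] <= minute:
--                 counts[name][minute] = data["decision_count"][name][0]
--             elif name == "CD" and minutes - cost[name] <= minute:
--                 counts[name][minute] = data["decision_count"][name][0] - \
--                     data["bus_count"]["CD - bus"][0]
--             elif name == "CD - bus" and minutes - cost[name] <= minute:
--                 counts[name][minute] = data["bus_count"][name][0]
--     return counts
-- ===== SOURCE B (Python) =====
-- NAMES = ["AB", "AC", "AC - bus", "Buspas", "Łącznik", "BD", "CD", "CD - bus"]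
--
--
-- def make_counts(data, cost, minutes):
--     '''
--     Interval re-implementation: every road carries one constant value over a
--     single window of minutes, so pick the window and the value once per road
--     and build the row with one slice assignment.  Missing cost keys count as
--     0 and missing data entries as 0 cars, so incomplete inputs yield rows of
--     zeros instead of KeyError.
--     '''
--     n = max(minutes, 0)
--     decision = data.get("decision_count", {})
--     bus = data.get("bus_count", {})
--
--     def cars(group, name):
--         xs = group.get(name, [])
--         return xs[0] if xs else 0
--
--     def c(name):
--         return cost.get(name, 0)
--
--     counts = {}
--     for name in NAMES:
--         if name in ("AB", "AC"):
--             lo, hi, value = 0, c(name) + 1, cars(decision, name)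
--         elif name in ("AC - bus", "Buspas"):
--             lo, hi, value = 0, c(name) + 1, cars(bus, name)
--         elif name == "Łącznik":
--             lo, hi, value = c("AB"), c("AB") + c(name) + 1, cars(decision, name)
--         elif name == "CD - bus":
--             lo, hi, value = n - c(name), n, cars(bus, name)
--         else:  # BD, CD: traffic arrives during the last cost[name] minutes
--             lo, hi, value = n - c(name), n, cars(decision, name)
--             if name == "CD":
--                 value -= cars(bus, "CD - bus")
--         lo, hi = max(lo, 0), min(hi, n)
--         row = [0] * n
--         if lo < hi:
--             row[lo:hi] = [value] * (hi - lo)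
--         counts[name] = row
--     return counts
-- ===== Notes on version B (the rewrite author's own statement) =====
-- stated objective: simpler
-- what changed: A tests a six-branch condition cascade at every single minute of every road; B picks each road's window of minutes and constant value once and builds the row with one slice fill, treating a missing cost key or data entry as 0 (where A raises KeyError, outside Pre_).
import Mathlib
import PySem

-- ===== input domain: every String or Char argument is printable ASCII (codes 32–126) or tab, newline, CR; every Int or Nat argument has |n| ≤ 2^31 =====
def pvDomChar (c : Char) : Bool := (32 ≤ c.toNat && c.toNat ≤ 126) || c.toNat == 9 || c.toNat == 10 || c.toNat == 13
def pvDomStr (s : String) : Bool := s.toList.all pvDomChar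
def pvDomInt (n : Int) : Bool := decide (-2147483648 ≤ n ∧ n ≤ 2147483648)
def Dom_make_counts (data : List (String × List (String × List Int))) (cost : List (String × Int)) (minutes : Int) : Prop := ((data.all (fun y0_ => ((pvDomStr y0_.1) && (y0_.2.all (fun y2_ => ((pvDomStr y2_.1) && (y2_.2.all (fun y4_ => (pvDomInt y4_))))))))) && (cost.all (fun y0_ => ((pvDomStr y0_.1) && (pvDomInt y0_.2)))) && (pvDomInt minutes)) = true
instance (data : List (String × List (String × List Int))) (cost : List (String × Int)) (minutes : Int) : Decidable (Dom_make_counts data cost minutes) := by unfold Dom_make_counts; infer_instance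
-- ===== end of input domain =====

-- B replaces A's per-minute condition cascade by one window + one slice fill per road, with
-- missing cost keys/data entries counting as 0 (objective: simpler); return value only —
-- A returns a fresh dict, neither mutates its arguments.

-- shared low-level helpers (Python dict/list lookups; defaults only matter outside Pre_)
def pvNames : List String := ["AB", "AC", "AC - bus", "Buspas", "Łącznik", "BD", "CD", "CD - bus"]

def pvCost (cost : List (String × Int)) (k : String) : Int :=
  (PySem.Dict.mk cost).getD k 0

def pvVal (data : List (String × List (String × List Int))) (grp name : String) : Int :=
  PySem.List.pyGetD ((PySem.Dict.mk ((PySem.Dict.mk data).getD grp [])).getD name []) 0 0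

-- ===== PORT A =====
-- body of A's inner 'for minute in range(minutes)' loop, as a named helper
def pvInnerA (data : List (String × List (String × List Int))) (cost : List (String × Int)) (minutes : Int)
    (name : String) (counts : PySem.Dict String (List Int)) (minute : Int) : PySem.Dict String (List Int) :=
  if (name = "AB" ∨ name = "AC") ∧ minute ≤ pvCost cost name then
    counts.insert name (PySem.List.pySetD (counts.getD name []) minute (pvVal data "decision_count" name))
  else if (name = "AC - bus" ∨ name = "Buspas") ∧ minute ≤ pvCost cost name then
    counts.insert name (PySem.List.pySetD (counts.getD name []) minute (pvVal data "bus_count" name))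
  else if name = "Łącznik" ∧ pvCost cost "AB" ≤ minute ∧ minute ≤ pvCost cost "AB" + pvCost cost name then
    counts.insert name (PySem.List.pySetD (counts.getD name []) minute (pvVal data "decision_count" name))
  else if name = "BD" ∧ minutes - pvCost cost name ≤ minute then
    counts.insert name (PySem.List.pySetD (counts.getD name []) minute (pvVal data "decision_count" name))
  else if name = "CD" ∧ minutes - pvCost cost name ≤ minute then
    counts.insert name (PySem.List.pySetD (counts.getD name []) minute (pvVal data "decision_count" name - pvVal data "bus_count" "CD - bus"))
  else if name = "CD - bus" ∧ minutes - pvCost cost name ≤ minute then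
    counts.insert name (PySem.List.pySetD (counts.getD name []) minute (pvVal data "bus_count" name))
  else counts

-- body of A's outer 'for name in names' loop: counts[name] = [0]*minutes, then the minute loop
def pvStepA (data : List (String × List (String × List Int))) (cost : List (String × Int)) (minutes : Int)
    (counts0 : PySem.Dict String (List Int)) (name : String) : PySem.Dict String (List Int) :=
  (PySem.List.pyRange 0 minutes 1).foldl (pvInnerA data cost minutes name)
    (counts0.insert name (PySem.List.pyRepeat [(0 : Int)] minutes))

def make_counts (data : List (String × List (String × List Int))) (cost : List (String × Int)) (minutes : Int) : List (String × List Int) :=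
  (pvNames.foldl (pvStepA data cost minutes) PySem.Dict.empty).items

-- ===== PORT B =====
-- slice assignment 'if lo < hi: row[lo:hi] = [v]*(hi-lo)' after 'lo, hi = max(lo,0), min(hi,n)'
-- on a fresh zero row of length n: exact as the three-block concatenation below.
def pvFilled (n : Nat) (lo hi : Int) (v : Int) : List Int :=
  if max lo 0 ≥ min hi (n : Int) then List.replicate n 0
  else
    List.replicate (max lo 0).toNat 0 ++
      (List.replicate (min hi (n : Int) - max lo 0).toNat v ++
        List.replicate (n - (min hi (n : Int)).toNat) 0)

-- body of B's 'for name in NAMES' loop: pick (lo, hi, value) by the branch on name, then one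
-- slice fill; B's 'cost.get(name, 0)' is pvCost and its 'cars' helper
-- ('group.get(name, [])', then 'xs[0] if xs else 0') is pvVal, both exact
def pvRowB (data : List (String × List (String × List Int))) (cost : List (String × Int)) (minutes : Int)
    (name : String) : List Int :=
  let n : Int := max minutes 0
  let t : Int × Int × Int :=
    if name = "AB" ∨ name = "AC" then (0, pvCost cost name + 1, pvVal data "decision_count" name)
    else if name = "AC - bus" ∨ name = "Buspas" then (0, pvCost cost name + 1, pvVal data "bus_count" name)
    else if name = "Łącznik" then (pvCost cost "AB", pvCost cost "AB" + pvCost cost name + 1, pvVal data "decision_count" name)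
    else if name = "CD - bus" then (n - pvCost cost name, n, pvVal data "bus_count" name)
    else (n - pvCost cost name, n,
      if name = "CD" then pvVal data "decision_count" name - pvVal data "bus_count" "CD - bus"
      else pvVal data "decision_count" name)
  pvFilled n.toNat t.1 t.2.1 t.2.2

def make_counts_alt (data : List (String × List (String × List Int))) (cost : List (String × Int)) (minutes : Int) : List (String × List Int) :=
  (pvNames.foldl (fun d name => d.insert name (pvRowB data cost minutes name)) PySem.Dict.empty).items

-- ===== PRECONDITION & SPEC =====
def pvHasCost (cost : List (String × Int)) (k : String) : Bool :=
  ((PySem.Dict.mk cost).get? k).isSome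

def pvEntryOk (data : List (String × List (String × List Int))) (grp name : String) : Bool :=
  match (PySem.Dict.mk data).get? grp with
  | none => false
  | some m =>
    match (PySem.Dict.mk m).get? name with
    | some (_ :: _) => true
    | _ => false

-- Pre_ = exactly the inputs on which Python A returns (no KeyError/IndexError): with
-- minutes > 0 every road's cost key is read, cost["Łącznik"] only when cost["AB"] < minutes,
-- and each data entry only when that road's window of minutes is nonempty.
def Pre_make_counts (data : List (String × List (String × List Int))) (cost : List (String × Int)) (minutes : Int) : Prop :=
  minutes ≤ 0 ∨
  (pvHasCost cost "AB" = true ∧ pvHasCost cost "AC" = true ∧ pvHasCost cost "AC - bus" = true ∧ pvHasCost cost "Buspas" = true ∧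
   pvHasCost cost "BD" = true ∧ pvHasCost cost "CD" = true ∧ pvHasCost cost "CD - bus" = true ∧
   (pvCost cost "AB" < minutes → pvHasCost cost "Łącznik" = true) ∧
   (0 ≤ pvCost cost "AB" → pvEntryOk data "decision_count" "AB" = true) ∧
   (0 ≤ pvCost cost "AC" → pvEntryOk data "decision_count" "AC" = true) ∧
   (0 ≤ pvCost cost "AC - bus" → pvEntryOk data "bus_count" "AC - bus" = true) ∧
   (0 ≤ pvCost cost "Buspas" → pvEntryOk data "bus_count" "Buspas" = true) ∧
   (max (pvCost cost "AB") 0 < min (pvCost cost "AB" + pvCost cost "Łącznik" + 1) minutes →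
     pvEntryOk data "decision_count" "Łącznik" = true) ∧
   (1 ≤ pvCost cost "BD" → pvEntryOk data "decision_count" "BD" = true) ∧
   (1 ≤ pvCost cost "CD" → pvEntryOk data "decision_count" "CD" = true ∧ pvEntryOk data "bus_count" "CD - bus" = true) ∧
   (1 ≤ pvCost cost "CD - bus" → pvEntryOk data "bus_count" "CD - bus" = true))

instance (data : List (String × List (String × List Int))) (cost : List (String × Int)) (minutes : Int) : Decidable (Pre_make_counts data cost minutes) := by unfold Pre_make_counts; infer_instance

def pvWitness_make_counts : (List (String × List (String × List Int))) × (List (String × Int)) × Int :=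
  ([("decision_count", [("AB", [3]), ("AC", [1]), ("BD", [2]), ("CD", [5])]),
    ("bus_count", [("AC - bus", [1]), ("Buspas", [1]), ("CD - bus", [2])])],
   [("AB", 9), ("AC", 1), ("AC - bus", 1), ("Buspas", 1), ("BD", 1), ("CD", 1), ("CD - bus", 1)],
   3)

def Spec_make_counts (data : List (String × List (String × List Int))) (cost : List (String × Int)) (minutes : Int) (out : List (String × List Int)) : Prop := out = make_counts_alt data cost minutes
instance (data : List (String × List (String × List Int))) (cost : List (String × Int)) (minutes : Int) (out : List (String × List Int)) : Decidable (Spec_make_counts data cost minutes out) := by unfold Spec_make_counts; infer_instance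

-- ===== CLAIM (what is proved, stated in full; the proofs are below) =====
def Claim_equal_make_counts : Prop := ∀ (data : List (String × List (String × List Int))) (cost : List (String × Int)) (minutes : Int), Dom_make_counts data cost minutes → Pre_make_counts data cost minutes → Spec_make_counts data cost minutes (make_counts data cost minutes)


-- ===== LEMMAS AND PROOFS =====

-- row produced by A's inner per-minute loop for one road, abstracted over its condition
def pvRowFold (m : Int) (P : Int → Prop) [DecidablePred P] (v : Int) : List Int :=
  (PySem.List.pyRange 0 m 1).foldl (fun r x => if P x then PySem.List.pySetD r x v else r)
    (PySem.List.pyRepeat [(0 : Int)] m)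

theorem pv_lift (l : List Int) (name : String) (P : Int → Prop) [DecidablePred P]
    (g : List Int → Int → List Int) (d : PySem.Dict String (List Int)) (row : List Int) :
    l.foldl (fun c x => if P x then c.insert name (g (c.getD name []) x) else c) (d.insert name row)
      = d.insert name (l.foldl (fun r x => if P x then g r x else r) row) := by
  induction l generalizing row with
  | nil => rfl
  | cons x l ih =>
    simp only [List.foldl]
    by_cases h : P x
    · simp only [if_pos h, PySem.Dict.getD_insert_self, PySem.Dict.insert_insert_self, ih]
    · simp only [if_neg h, ih]

theorem pv_len_foldl (P : Int → Prop) [DecidablePred P] (v : Int) (l : List Int) (row : List Int) :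
    (l.foldl (fun r x => if P x then PySem.List.pySetD r x v else r) row).length = row.length := by
  induction l generalizing row with
  | nil => rfl
  | cons x l ih => simp only [List.foldl]; rw [ih]; split <;> simp [PySem.List.length_pySetD]

theorem pv_getElem?_foldl (P : Int → Prop) [DecidablePred P] (v : Int) (l : List Int) (row : List Int)
    (hl : ∀ x ∈ l, 0 ≤ x ∧ x < (row.length : Int)) (k : Nat) :
    (l.foldl (fun r x => if P x then PySem.List.pySetD r x v else r) row)[k]? =
      if (k : Int) ∈ l ∧ P (k : Int) then some v else row[k]? := by
  induction l generalizing row with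
  | nil => simp
  | cons x l ih =>
    obtain ⟨hx0, hxlt⟩ := hl x (List.mem_cons_self)
    have hrow' : ∀ y ∈ l, 0 ≤ y ∧ y < ((if P x then PySem.List.pySetD row x v else row).length : Int) := by
      intro y hy
      have := hl y (List.mem_cons_of_mem _ hy)
      split <;> simpa [PySem.List.length_pySetD] using this
    simp only [List.foldl]
    rw [ih _ hrow']
    by_cases hkl : (k : Int) ∈ l ∧ P (k : Int)
    · rw [if_pos hkl, if_pos ⟨List.mem_cons_of_mem _ hkl.1, hkl.2⟩]
    · rw [if_neg hkl]
      by_cases hx : P x ∧ x = (k : Int)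
      · have hPk : P (k : Int) := hx.2 ▸ hx.1
        have hmem : (k : Int) ∈ x :: l := by rw [← hx.2]; exact List.mem_cons_self
        rw [if_pos hx.1, if_pos ⟨hmem, hPk⟩, PySem.List.pySetD_of_nonneg _ _ hx0]
        have hk : x.toNat = k := by omega
        rw [hk]
        exact List.getElem?_set_self (by omega)
      · have hcond : ¬((k : Int) ∈ x :: l ∧ P (k : Int)) := by
          rintro ⟨hm, hPk⟩
          rcases List.mem_cons.mp hm with h | h
          · exact hx ⟨h ▸ hPk, h.symm⟩
          · exact hkl ⟨h, hPk⟩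
        rw [if_neg hcond]
        by_cases hPx : P x
        · rw [if_pos hPx, PySem.List.pySetD_of_nonneg _ _ hx0]
          have hne : x.toNat ≠ k := fun hc => hx ⟨hPx, by omega⟩
          exact List.getElem?_set_ne hne
        · rw [if_neg hPx]

theorem pvRowFold_length (m : Int) (P : Int → Prop) [DecidablePred P] (v : Int) :
    (pvRowFold m P v).length = m.toNat := by
  unfold pvRowFold
  rw [pv_len_foldl]
  simp [PySem.List.pyRepeat_singleton]

theorem pvRowFold_getElem? (m : Int) (P : Int → Prop) [DecidablePred P] (v : Int) (k : Nat)
    (hk : k < m.toNat) :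
    (pvRowFold m P v)[k]? = some (if P (k : Int) then v else 0) := by
  unfold pvRowFold
  rw [PySem.List.pyRepeat_singleton,
    pv_getElem?_foldl P v _ _ (by
      intro x hx
      rw [PySem.List.mem_pyRange_one] at hx
      simp only [List.length_replicate]
      omega) k]
  have hmem : (k : Int) ∈ PySem.List.pyRange 0 m 1 := by
    rw [PySem.List.mem_pyRange_one]; omega
  by_cases hP : P (k : Int)
  · rw [if_pos ⟨hmem, hP⟩, if_pos hP]
  · rw [if_neg (by tauto), if_neg hP, List.getElem?_replicate, if_pos hk]

theorem pvFilled_length (n : Nat) (a b v : Int) : (pvFilled n a b v).length = n := by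
  unfold pvFilled
  split
  · simp
  · simp only [List.length_append, List.length_replicate]
    omega

theorem pvFilled_getElem? (n : Nat) (a b v : Int) (k : Nat) (hk : k < n) :
    (pvFilled n a b v)[k]? = some (if a ≤ (k : Int) ∧ (k : Int) < b then v else 0) := by
  unfold pvFilled
  by_cases hw : max a 0 ≥ min b (n : Int)
  · rw [if_pos hw, if_neg (by omega), List.getElem?_replicate, if_pos hk]
  · rw [if_neg hw]
    by_cases h1 : k < (max a 0).toNat
    · rw [List.getElem?_append_left (by simpa using h1), if_neg (by omega),
        List.getElem?_replicate, if_pos h1]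
    · by_cases h2 : k < (min b (n : Int)).toNat
      · rw [List.getElem?_append_right (by simpa using h1),
          List.getElem?_append_left (by simp only [List.length_replicate]; omega),
          if_pos (by omega), List.getElem?_replicate, if_pos (by simp only [List.length_replicate]; omega)]
      · rw [List.getElem?_append_right (by simpa using h1),
          List.getElem?_append_right (by simp only [List.length_replicate]; omega),
          if_neg (by omega), List.getElem?_replicate, if_pos (by simp only [List.length_replicate]; omega)]

theorem pv_row_eq (m : Int) (P : Int → Prop) [DecidablePred P] (v a b : Int)
    (h : ∀ x : Int, 0 ≤ x → x < m → (P x ↔ a ≤ x ∧ x < b)) :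
    pvRowFold m P v = pvFilled m.toNat a b v := by
  apply List.ext_getElem?
  intro k
  by_cases hk : k < m.toNat
  · rw [pvRowFold_getElem? _ _ _ _ hk, pvFilled_getElem? _ _ _ _ _ hk]
    rw [if_congr (h k (by omega) (by omega)) rfl rfl]
  · rw [List.getElem?_eq_none (by rw [pvRowFold_length]; omega),
      List.getElem?_eq_none (by rw [pvFilled_length]; omega)]

theorem pv_step (data : List (String × List (String × List Int))) (cost : List (String × Int)) (minutes : Int)
    (d : PySem.Dict String (List Int)) (name : String) (P : Int → Prop) [DecidablePred P] (v : Int)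
    (h : pvInnerA data cost minutes name = fun c x =>
      if P x then c.insert name (PySem.List.pySetD (c.getD name []) x v) else c) :
    pvStepA data cost minutes d name = d.insert name (pvRowFold minutes P v) := by
  unfold pvStepA pvRowFold
  rw [h]
  exact pv_lift _ name P (fun r x => PySem.List.pySetD r x v) d _

theorem pv_inner_AB (data : List (String × List (String × List Int))) (cost : List (String × Int)) (minutes : Int) :
    pvInnerA data cost minutes "AB" = fun c x =>
      if x ≤ pvCost cost "AB" then c.insert "AB" (PySem.List.pySetD (c.getD "AB" []) x (pvVal data "decision_count" "AB")) else c := by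
  funext c x; unfold pvInnerA; simp

theorem pv_inner_AC (data : List (String × List (String × List Int))) (cost : List (String × Int)) (minutes : Int) :
    pvInnerA data cost minutes "AC" = fun c x =>
      if x ≤ pvCost cost "AC" then c.insert "AC" (PySem.List.pySetD (c.getD "AC" []) x (pvVal data "decision_count" "AC")) else c := by
  funext c x; unfold pvInnerA; simp

theorem pv_inner_ACbus (data : List (String × List (String × List Int))) (cost : List (String × Int)) (minutes : Int) :
    pvInnerA data cost minutes "AC - bus" = fun c x =>
      if x ≤ pvCost cost "AC - bus" then c.insert "AC - bus" (PySem.List.pySetD (c.getD "AC - bus" []) x (pvVal data "bus_count" "AC - bus")) else c := by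
  funext c x; unfold pvInnerA; simp

theorem pv_inner_Buspas (data : List (String × List (String × List Int))) (cost : List (String × Int)) (minutes : Int) :
    pvInnerA data cost minutes "Buspas" = fun c x =>
      if x ≤ pvCost cost "Buspas" then c.insert "Buspas" (PySem.List.pySetD (c.getD "Buspas" []) x (pvVal data "bus_count" "Buspas")) else c := by
  funext c x; unfold pvInnerA; simp

theorem pv_inner_L (data : List (String × List (String × List Int))) (cost : List (String × Int)) (minutes : Int) :
    pvInnerA data cost minutes "Łącznik" = fun c x =>
      if pvCost cost "AB" ≤ x ∧ x ≤ pvCost cost "AB" + pvCost cost "Łącznik" then c.insert "Łącznik" (PySem.List.pySetD (c.getD "Łącznik" []) x (pvVal data "decision_count" "Łącznik")) else c := by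
  funext c x; unfold pvInnerA; simp

theorem pv_inner_BD (data : List (String × List (String × List Int))) (cost : List (String × Int)) (minutes : Int) :
    pvInnerA data cost minutes "BD" = fun c x =>
      if minutes - pvCost cost "BD" ≤ x then c.insert "BD" (PySem.List.pySetD (c.getD "BD" []) x (pvVal data "decision_count" "BD")) else c := by
  funext c x; unfold pvInnerA; simp

theorem pv_inner_CD (data : List (String × List (String × List Int))) (cost : List (String × Int)) (minutes : Int) :
    pvInnerA data cost minutes "CD" = fun c x =>
      if minutes - pvCost cost "CD" ≤ x then c.insert "CD" (PySem.List.pySetD (c.getD "CD" []) x (pvVal data "decision_count" "CD" - pvVal data "bus_count" "CD - bus")) else c := by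
  funext c x; unfold pvInnerA; simp

theorem pv_inner_CDbus (data : List (String × List (String × List Int))) (cost : List (String × Int)) (minutes : Int) :
    pvInnerA data cost minutes "CD - bus" = fun c x =>
      if minutes - pvCost cost "CD - bus" ≤ x then c.insert "CD - bus" (PySem.List.pySetD (c.getD "CD - bus" []) x (pvVal data "bus_count" "CD - bus")) else c := by
  funext c x; unfold pvInnerA; simp

-- pv_row_eq, restated with the clamped length (max m 0).toNat that pvRowB uses
theorem pv_row_eq' (m : Int) (P : Int → Prop) [DecidablePred P] (v a b : Int)
    (h : ∀ x : Int, 0 ≤ x → x < m → (P x ↔ a ≤ x ∧ x < b)) :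
    pvRowFold m P v = pvFilled (max m 0).toNat a b v := by
  rw [show (max m 0).toNat = m.toNat by omega]
  exact pv_row_eq m P v a b h

theorem pvRowB_AB (data : List (String × List (String × List Int))) (cost : List (String × Int)) (minutes : Int) :
    pvRowB data cost minutes "AB" = pvFilled (max minutes 0).toNat 0 (pvCost cost "AB" + 1) (pvVal data "decision_count" "AB") := by
  unfold pvRowB; simp

theorem pvRowB_AC (data : List (String × List (String × List Int))) (cost : List (String × Int)) (minutes : Int) :
    pvRowB data cost minutes "AC" = pvFilled (max minutes 0).toNat 0 (pvCost cost "AC" + 1) (pvVal data "decision_count" "AC") := by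
  unfold pvRowB; simp

theorem pvRowB_ACbus (data : List (String × List (String × List Int))) (cost : List (String × Int)) (minutes : Int) :
    pvRowB data cost minutes "AC - bus" = pvFilled (max minutes 0).toNat 0 (pvCost cost "AC - bus" + 1) (pvVal data "bus_count" "AC - bus") := by
  unfold pvRowB; simp

theorem pvRowB_Buspas (data : List (String × List (String × List Int))) (cost : List (String × Int)) (minutes : Int) :
    pvRowB data cost minutes "Buspas" = pvFilled (max minutes 0).toNat 0 (pvCost cost "Buspas" + 1) (pvVal data "bus_count" "Buspas") := by
  unfold pvRowB; simp

theorem pvRowB_L (data : List (String × List (String × List Int))) (cost : List (String × Int)) (minutes : Int) :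
    pvRowB data cost minutes "Łącznik" = pvFilled (max minutes 0).toNat (pvCost cost "AB") (pvCost cost "AB" + pvCost cost "Łącznik" + 1) (pvVal data "decision_count" "Łącznik") := by
  unfold pvRowB; simp

theorem pvRowB_BD (data : List (String × List (String × List Int))) (cost : List (String × Int)) (minutes : Int) :
    pvRowB data cost minutes "BD" = pvFilled (max minutes 0).toNat (max minutes 0 - pvCost cost "BD") (max minutes 0) (pvVal data "decision_count" "BD") := by
  unfold pvRowB; simp

theorem pvRowB_CD (data : List (String × List (String × List Int))) (cost : List (String × Int)) (minutes : Int) :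
    pvRowB data cost minutes "CD" = pvFilled (max minutes 0).toNat (max minutes 0 - pvCost cost "CD") (max minutes 0) (pvVal data "decision_count" "CD" - pvVal data "bus_count" "CD - bus") := by
  unfold pvRowB; simp

theorem pvRowB_CDbus (data : List (String × List (String × List Int))) (cost : List (String × Int)) (minutes : Int) :
    pvRowB data cost minutes "CD - bus" = pvFilled (max minutes 0).toNat (max minutes 0 - pvCost cost "CD - bus") (max minutes 0) (pvVal data "bus_count" "CD - bus") := by
  unfold pvRowB; simp

theorem make_counts_ports_eq (data : List (String × List (String × List Int))) (cost : List (String × Int)) (minutes : Int) :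
    make_counts data cost minutes = make_counts_alt data cost minutes := by
  unfold make_counts
  simp only [pvNames, List.foldl_cons, List.foldl_nil]
  rw [pv_step data cost minutes _ "AB" _ _ (pv_inner_AB data cost minutes),
    pv_step data cost minutes _ "AC" _ _ (pv_inner_AC data cost minutes),
    pv_step data cost minutes _ "AC - bus" _ _ (pv_inner_ACbus data cost minutes),
    pv_step data cost minutes _ "Buspas" _ _ (pv_inner_Buspas data cost minutes),
    pv_step data cost minutes _ "Łącznik" _ _ (pv_inner_L data cost minutes),
    pv_step data cost minutes _ "BD" _ _ (pv_inner_BD data cost minutes),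
    pv_step data cost minutes _ "CD" _ _ (pv_inner_CD data cost minutes),
    pv_step data cost minutes _ "CD - bus" _ _ (pv_inner_CDbus data cost minutes)]
  unfold make_counts_alt
  simp only [pvNames, List.foldl_cons, List.foldl_nil,
    pvRowB_AB, pvRowB_AC, pvRowB_ACbus, pvRowB_Buspas, pvRowB_L, pvRowB_BD, pvRowB_CD, pvRowB_CDbus]
  rw [pv_row_eq' minutes _ _ 0 (pvCost cost "AB" + 1) (by intro x h0 h1; omega),
    pv_row_eq' minutes _ _ 0 (pvCost cost "AC" + 1) (by intro x h0 h1; omega),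
    pv_row_eq' minutes _ _ 0 (pvCost cost "AC - bus" + 1) (by intro x h0 h1; omega),
    pv_row_eq' minutes _ _ 0 (pvCost cost "Buspas" + 1) (by intro x h0 h1; omega),
    pv_row_eq' minutes _ _ (pvCost cost "AB") (pvCost cost "AB" + pvCost cost "Łącznik" + 1) (by intro x h0 h1; omega),
    pv_row_eq' minutes _ _ (max minutes 0 - pvCost cost "BD") (max minutes 0) (by intro x h0 h1; omega),
    pv_row_eq' minutes _ _ (max minutes 0 - pvCost cost "CD") (max minutes 0) (by intro x h0 h1; omega),
    pv_row_eq' minutes _ _ (max minutes 0 - pvCost cost "CD - bus") (max minutes 0) (by intro x h0 h1; omega)]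

-- ===== VERDICT (by name: the statement is the Claim_ definition above) =====
theorem make_counts_spec : Claim_equal_make_counts := by
  intro data cost minutes _ _
  unfold Spec_make_counts
  exact make_counts_ports_eq data cost minutes
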